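-- pv_equiv track=rewrite | github.com/tulus42/BP | minimax.py | minimax_step
-- ===== SOURCE A (Python) =====
-- def minimax_step(a1, a2, mrx, depth, is_mrx, h):
--     if out_of_range(a1) or out_of_range(a2) or out_of_range(mrx):
--         return 1000 if is_mrx else -1000
--
--     if a1 == mrx or a2 == mrx:
--         return -100 * (h - depth + 1) # caught sooner -> higher penalty
--
--     if depth == h:
--         return min(get_distance(a1, mrx), get_distance(a2, mrx))
--
--     if is_mrx:
--         return max(minimax_step(a1, a2, [mrx[0]+1, mrx[1]], depth + 1, False, h),
--                    minimax_step(a1, a2, [mrx[0]-1, mrx[1]], depth + 1, False, h),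
--                    minimax_step(a1, a2, [mrx[0], mrx[1]+1], depth + 1, False, h),
--                    minimax_step(a1, a2, [mrx[0], mrx[1]-1], depth + 1, False, h))
--     else:
--         return min(minimax_step([a1[0]+1, a1[1]], a2, mrx, depth + 1, True, h),
--                    minimax_step([a1[0]-1, a1[1]], a2, mrx, depth + 1, True, h),
--                    minimax_step([a1[0], a1[1]+1], a2, mrx, depth + 1, True, h),
--                    minimax_step([a1[0], a1[1]-1], a2, mrx, depth + 1, True, h),
--                    minimax_step(a1, [a2[0]+1, a2[1]], mrx, depth + 1, True, h),
--                    minimax_step(a1, [a2[0]-1, a2[1]], mrx, depth + 1, True, h),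
--                    minimax_step(a1, [a2[0], a2[1]+1], mrx, depth + 1, True, h),
--                    minimax_step(a1, [a2[0], a2[1]-1], mrx, depth + 1, True, h))
--
-- def out_of_range(x):
--     if x[0] < 0 or x[0] > 4 or x[1] < 0 or x[1] > 4:
--         return True
--     else:
--         return False
--
-- def get_distance(a, mrx):
--     x = abs(a[0] - mrx[0])
--     y = abs(a[1] - mrx[1])
--     return x + y
-- ===== SOURCE B (Python) =====
-- def minimax_step(a1, a2, mrx, depth, is_mrx, h):
--     # bottom-up dynamic programming over all 25^3 board states instead of
--     # re-exploring the 8^(h-depth) game tree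
--     if a1[0] < 0 or a1[0] > 4 or a1[1] < 0 or a1[1] > 4 \
--        or a2[0] < 0 or a2[0] > 4 or a2[1] < 0 or a2[1] > 4 \
--        or mrx[0] < 0 or mrx[0] > 4 or mrx[1] < 0 or mrx[1] > 4:
--         return 1000 if is_mrx else -1000
--     if a1 == mrx or a2 == mrx:
--         return -100 * (h - depth + 1)
--
--     def dist(p, q):
--         return abs(p // 5 - q // 5) + abs(p % 5 - q % 5)
--
--     def step(p, dx, dy):
--         # new square of a piece on square p after moving by (dx,dy), None if off board
--         x, y = p // 5 + dx, p % 5 + dy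
--         return x * 5 + y if 0 <= x <= 4 and 0 <= y <= 4 else None
--
--     levels = h - depth
--     if levels < 0:
--         levels = 0
--
--     # layer 0 (= depth h): caught -> -100, else min manhattan distance
--     table = [(-100 if s // 625 == s % 25 or s // 25 % 25 == s % 25 else
--               min(dist(s // 625, s % 25), dist(s // 25 % 25, s % 25)))
--              for s in range(15625)]
--
--     for k in range(1, levels + 1):
--         turn = is_mrx if (levels - k) % 2 == 0 else (not is_mrx)
--         oor_val = -1000 if turn else 1000
--         new = []
--         for s in range(15625):
--             p1, p2, pm = s // 625, s // 25 % 25, s % 25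
--             if p1 == pm or p2 == pm:
--                 new.append(-100 * (k + 1))
--                 continue
--             if turn:
--                 best = max((table[p1 * 625 + p2 * 25 + step(pm, 1, 0)] if step(pm, 1, 0) is not None else oor_val),
--                            (table[p1 * 625 + p2 * 25 + step(pm, -1, 0)] if step(pm, -1, 0) is not None else oor_val),
--                            (table[p1 * 625 + p2 * 25 + step(pm, 0, 1)] if step(pm, 0, 1) is not None else oor_val),
--                            (table[p1 * 625 + p2 * 25 + step(pm, 0, -1)] if step(pm, 0, -1) is not None else oor_val))
--             else:
--                 best = min((table[step(p1, 1, 0) * 625 + p2 * 25 + pm] if step(p1, 1, 0) is not None else oor_val),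
--                            (table[step(p1, -1, 0) * 625 + p2 * 25 + pm] if step(p1, -1, 0) is not None else oor_val),
--                            (table[step(p1, 0, 1) * 625 + p2 * 25 + pm] if step(p1, 0, 1) is not None else oor_val),
--                            (table[step(p1, 0, -1) * 625 + p2 * 25 + pm] if step(p1, 0, -1) is not None else oor_val),
--                            (table[p1 * 625 + step(p2, 1, 0) * 25 + pm] if step(p2, 1, 0) is not None else oor_val),
--                            (table[p1 * 625 + step(p2, -1, 0) * 25 + pm] if step(p2, -1, 0) is not None else oor_val),
--                            (table[p1 * 625 + step(p2, 0, 1) * 25 + pm] if step(p2, 0, 1) is not None else oor_val),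
--                            (table[p1 * 625 + step(p2, 0, -1) * 25 + pm] if step(p2, 0, -1) is not None else oor_val))
--             new.append(best)
--         table = new
--
--     s0 = (a1[0] * 5 + a1[1]) * 625 + (a2[0] * 5 + a2[1]) * 25 + (mrx[0] * 5 + mrx[1])
--     return table[s0]
-- ===== Notes on version B (the rewrite author's own statement) =====
-- stated objective: alternative
-- what changed: Replaces A's 8^(h-depth) game-tree recursion by bottom-up dynamic programming: one value table over all 25^3 (cop1, cop2, mrx) board states per remaining depth level, alternating the player to move.
-- outside the precondition, e.g. on minimax_step([2, 2, 0], [0, 0], [2, 2], 0, True, 2): A returns -100, B returns -300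
import Mathlib
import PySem

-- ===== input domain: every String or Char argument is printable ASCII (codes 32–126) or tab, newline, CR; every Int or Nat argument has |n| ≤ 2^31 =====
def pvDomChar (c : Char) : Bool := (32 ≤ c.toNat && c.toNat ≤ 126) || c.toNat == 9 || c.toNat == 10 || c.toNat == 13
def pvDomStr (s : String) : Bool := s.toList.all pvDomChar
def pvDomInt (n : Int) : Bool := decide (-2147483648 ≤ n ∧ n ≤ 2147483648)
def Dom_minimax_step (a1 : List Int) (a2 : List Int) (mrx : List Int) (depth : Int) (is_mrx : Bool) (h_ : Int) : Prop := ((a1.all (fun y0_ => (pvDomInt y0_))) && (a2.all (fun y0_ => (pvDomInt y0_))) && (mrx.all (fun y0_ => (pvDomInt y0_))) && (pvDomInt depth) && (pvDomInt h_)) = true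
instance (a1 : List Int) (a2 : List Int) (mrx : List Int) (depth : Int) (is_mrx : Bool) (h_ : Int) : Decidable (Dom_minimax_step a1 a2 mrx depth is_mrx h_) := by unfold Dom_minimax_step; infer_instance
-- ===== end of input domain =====

-- B replaces A's 8^(h-depth) game-tree recursion by bottom-up dynamic programming over all
-- 25^3 board states, one table per remaining depth level (objective: alternative algorithm).

-- ===== PORT A =====
-- x[i] for i = 0,1; exact on the lists of length 2 that Pre_ admits
def pyat (x : List Int) (i : Int) : Int := (PySem.List.pyGet? x i).getD 0

def oorA (x : List Int) : Bool :=
  decide (pyat x 0 < 0) || decide (pyat x 0 > 4) || decide (pyat x 1 < 0) || decide (pyat x 1 > 4)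

def distA (a mrx : List Int) : Int :=
  |pyat a 0 - pyat mrx 0| + |pyat a 1 - pyat mrx 1|

-- fuel = h - depth makes A's recursion structural; inside Pre_ the fuel-0 fallback (value 0)
-- is unreachable because depth = h exactly when fuel = 0
def mmA (fuel : Nat) (a1 a2 mrx : List Int) (depth : Int) (is_mrx : Bool) (h_ : Int) : Int :=
  if oorA a1 || oorA a2 || oorA mrx then (if is_mrx then 1000 else -1000)
  else if a1 == mrx || a2 == mrx then -100 * (h_ - depth + 1)
  else if depth == h_ then min (distA a1 mrx) (distA a2 mrx)
  else
    match fuel with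
    | 0 => 0
    | f + 1 =>
      if is_mrx then
        max (max (max
          (mmA f a1 a2 [pyat mrx 0 + 1, pyat mrx 1] (depth + 1) false h_)
          (mmA f a1 a2 [pyat mrx 0 - 1, pyat mrx 1] (depth + 1) false h_))
          (mmA f a1 a2 [pyat mrx 0, pyat mrx 1 + 1] (depth + 1) false h_))
          (mmA f a1 a2 [pyat mrx 0, pyat mrx 1 - 1] (depth + 1) false h_)
      else
        min (min (min (min (min (min (min
          (mmA f [pyat a1 0 + 1, pyat a1 1] a2 mrx (depth + 1) true h_)
          (mmA f [pyat a1 0 - 1, pyat a1 1] a2 mrx (depth + 1) true h_))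
          (mmA f [pyat a1 0, pyat a1 1 + 1] a2 mrx (depth + 1) true h_))
          (mmA f [pyat a1 0, pyat a1 1 - 1] a2 mrx (depth + 1) true h_))
          (mmA f a1 [pyat a2 0 + 1, pyat a2 1] mrx (depth + 1) true h_))
          (mmA f a1 [pyat a2 0 - 1, pyat a2 1] mrx (depth + 1) true h_))
          (mmA f a1 [pyat a2 0, pyat a2 1 + 1] mrx (depth + 1) true h_))
          (mmA f a1 [pyat a2 0, pyat a2 1 - 1] mrx (depth + 1) true h_)

def minimax_step (a1 : List Int) (a2 : List Int) (mrx : List Int) (depth : Int) (is_mrx : Bool) (h_ : Int) : Int :=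
  mmA (h_ - depth).toNat a1 a2 mrx depth is_mrx h_

-- ===== PORT B =====
-- square (x,y) with 0 ≤ x,y ≤ 4 encoded as x*5+y (Source B's `p = x*5+y`)
def encN (x y : Int) : Nat := x.toNat * 5 + y.toNat

-- Source B's dist(p, q)
def distB (p q : Nat) : Int :=
  |((p / 5 : Nat) : Int) - ((q / 5 : Nat) : Int)| + |((p % 5 : Nat) : Int) - ((q % 5 : Nat) : Int)|

-- Source B's step(p, dx, dy): new square of the moved piece, none if it left the board
def stepB (p : Nat) (dx dy : Int) : Option Nat :=
  let x : Int := ((p / 5 : Nat) : Int) + dx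
  let y : Int := ((p % 5 : Nat) : Int) + dy
  if 0 ≤ x ∧ x ≤ 4 ∧ 0 ≤ y ∧ y ≤ 4 then some (x.toNat * 5 + y.toNat) else none

def caughtB (s : Nat) : Bool := (s / 625 == s % 25) || (s / 25 % 25 == s % 25)

-- layer 0 (= depth h): caught -> -100, else min manhattan distance
def baseB (s : Nat) : Int :=
  if caughtB s then -100 else min (distB (s / 625) (s % 25)) (distB (s / 25 % 25) (s % 25))

-- `table[np] if np is not None else oor_val`, with mk plugging the moved square into the state index
def lookB (table : Array Int) (oorVal : Int) (o : Option Nat) (mk : Nat → Nat) : Int :=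
  match o with
  | some np => table[mk np]!
  | none => oorVal

-- the loop body for layer k (k ≥ 1): one new table entry for state s from the previous layer
def entryB (k : Nat) (turn : Bool) (prev : Array Int) (s : Nat) : Int :=
  let p1 := s / 625
  let p2 := s / 25 % 25
  let pm := s % 25
  if caughtB s then -100 * ((k : Int) + 1)
  else
    let oorVal : Int := if turn then -1000 else 1000
    if turn then
      max (max (max
        (lookB prev oorVal (stepB pm 1 0) (fun np => p1 * 625 + p2 * 25 + np))
        (lookB prev oorVal (stepB pm (-1) 0) (fun np => p1 * 625 + p2 * 25 + np)))
        (lookB prev oorVal (stepB pm 0 1) (fun np => p1 * 625 + p2 * 25 + np)))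
        (lookB prev oorVal (stepB pm 0 (-1)) (fun np => p1 * 625 + p2 * 25 + np))
    else
      min (min (min (min (min (min (min
        (lookB prev oorVal (stepB p1 1 0) (fun np => np * 625 + p2 * 25 + pm))
        (lookB prev oorVal (stepB p1 (-1) 0) (fun np => np * 625 + p2 * 25 + pm)))
        (lookB prev oorVal (stepB p1 0 1) (fun np => np * 625 + p2 * 25 + pm)))
        (lookB prev oorVal (stepB p1 0 (-1)) (fun np => np * 625 + p2 * 25 + pm)))
        (lookB prev oorVal (stepB p2 1 0) (fun np => p1 * 625 + np * 25 + pm)))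
        (lookB prev oorVal (stepB p2 (-1) 0) (fun np => p1 * 625 + np * 25 + pm)))
        (lookB prev oorVal (stepB p2 0 1) (fun np => p1 * 625 + np * 25 + pm)))
        (lookB prev oorVal (stepB p2 0 (-1)) (fun np => p1 * 625 + np * 25 + pm))

-- Source B's table after `levels` loop iterations; the turn alternates towards the root,
-- so layer k+1 for `turn` is built from layer k for `!turn`
def tblB : Nat → Bool → Array Int
  | 0, _ => Array.ofFn (fun s : Fin 15625 => baseB s)
  | k + 1, turn => Array.ofFn (fun s : Fin 15625 => entryB (k + 1) turn (tblB k (!turn)) s)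

def minimax_step_alt (a1 : List Int) (a2 : List Int) (mrx : List Int) (depth : Int) (is_mrx : Bool) (h_ : Int) : Int :=
  -- Source B's single inlined out-of-range guard over all three pieces
  if decide (pyat a1 0 < 0) || decide (pyat a1 0 > 4) || decide (pyat a1 1 < 0) || decide (pyat a1 1 > 4)
      || decide (pyat a2 0 < 0) || decide (pyat a2 0 > 4) || decide (pyat a2 1 < 0) || decide (pyat a2 1 > 4)
      || decide (pyat mrx 0 < 0) || decide (pyat mrx 0 > 4) || decide (pyat mrx 1 < 0) || decide (pyat mrx 1 > 4)
    then (if is_mrx then 1000 else -1000)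
  else if a1 == mrx || a2 == mrx then -100 * (h_ - depth + 1)
  else
    -- (h_-depth).toNat = Source B's `levels = max(h - depth, 0)`; after the guard all six
    -- coordinates are in 0..4, so encN matches Source B's s0 arithmetic
    (tblB (h_ - depth).toNat is_mrx)[encN (pyat a1 0) (pyat a1 1) * 625 +
      encN (pyat a2 0) (pyat a2 1) * 25 + encN (pyat mrx 0) (pyat mrx 1)]!

-- ===== PRECONDITION & SPEC =====
-- A's out_of_range(x) evaluates to True without raising (Python's `or` short-circuits)
abbrev OorTrue (x : List Int) : Prop :=
  (1 ≤ x.length ∧ (x.getD 0 0 < 0 ∨ 4 < x.getD 0 0)) ∨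
  (2 ≤ x.length ∧ 0 ≤ x.getD 0 0 ∧ x.getD 0 0 ≤ 4 ∧ (x.getD 1 0 < 0 ∨ 4 < x.getD 1 0))
-- A's out_of_range(x) evaluates to False without raising
abbrev OorFalse (x : List Int) : Prop :=
  2 ≤ x.length ∧ 0 ≤ x.getD 0 0 ∧ x.getD 0 0 ≤ 4 ∧ 0 ≤ x.getD 1 0 ∧ x.getD 1 0 ≤ 4

-- Pre_ excludes inputs where A raises (IndexError on lists shorter than the guard needs,
-- RecursionError when depth > h with no guard firing) and inputs whose game actually recurses
-- or measures distances with position lists of length ≠ 2, where A's list-equality capture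
-- test accidentally compares leftover tail elements of never-moved pieces.
def Pre_minimax_step (a1 : List Int) (a2 : List Int) (mrx : List Int) (depth : Int) (is_mrx : Bool) (h_ : Int) : Prop :=
  (OorTrue a1 ∨ (OorFalse a1 ∧ OorTrue a2) ∨ (OorFalse a1 ∧ OorFalse a2 ∧ OorTrue mrx)) ∨
  (OorFalse a1 ∧ OorFalse a2 ∧ OorFalse mrx ∧
    (a1 = mrx ∨ a2 = mrx ∨
     (depth = h_ ∧ ¬(a1.getD 0 0 = mrx.getD 0 0 ∧ a1.getD 1 0 = mrx.getD 1 0) ∧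
                   ¬(a2.getD 0 0 = mrx.getD 0 0 ∧ a2.getD 1 0 = mrx.getD 1 0)) ∨
     (a1.length = 2 ∧ a2.length = 2 ∧ mrx.length = 2 ∧ depth ≤ h_)))
instance (a1 : List Int) (a2 : List Int) (mrx : List Int) (depth : Int) (is_mrx : Bool) (h_ : Int) : Decidable (Pre_minimax_step a1 a2 mrx depth is_mrx h_) := by unfold Pre_minimax_step OorTrue OorFalse; exact instDecidableOr

def pvWitness_minimax_step : List Int × List Int × List Int × Int × Bool × Int :=
  ([0, 0], [4, 4], [2, 2], 0, true, 2)

def Spec_minimax_step (a1 : List Int) (a2 : List Int) (mrx : List Int) (depth : Int) (is_mrx : Bool) (h_ : Int) (out : Int) : Prop := out = minimax_step_alt a1 a2 mrx depth is_mrx h_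
instance (a1 : List Int) (a2 : List Int) (mrx : List Int) (depth : Int) (is_mrx : Bool) (h_ : Int) (out : Int) : Decidable (Spec_minimax_step a1 a2 mrx depth is_mrx h_ out) := by unfold Spec_minimax_step; infer_instance

-- ===== CLAIM (what is proved, stated in full; the proofs are below) =====
def Claim_equal_minimax_step : Prop := ∀ (a1 : List Int) (a2 : List Int) (mrx : List Int) (depth : Int) (is_mrx : Bool) (h_ : Int), Dom_minimax_step a1 a2 mrx depth is_mrx h_ → Pre_minimax_step a1 a2 mrx depth is_mrx h_ → Spec_minimax_step a1 a2 mrx depth is_mrx h_ (minimax_step a1 a2 mrx depth is_mrx h_)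

-- ===== LEMMAS AND PROOFS =====

theorem pvWitness_ok :
    Dom_minimax_step pvWitness_minimax_step.1 pvWitness_minimax_step.2.1 pvWitness_minimax_step.2.2.1
      pvWitness_minimax_step.2.2.2.1 pvWitness_minimax_step.2.2.2.2.1 pvWitness_minimax_step.2.2.2.2.2 ∧
    Pre_minimax_step pvWitness_minimax_step.1 pvWitness_minimax_step.2.1 pvWitness_minimax_step.2.2.1
      pvWitness_minimax_step.2.2.2.1 pvWitness_minimax_step.2.2.2.2.1 pvWitness_minimax_step.2.2.2.2.2 := by
  exact ⟨by with_unfolding_all decide, by decide⟩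

-- the coordinate-level invariant: A's recursion at fuel k agrees with Source B's layer-k table
def LProp (k : Nat) : Prop :=
  ∀ (turn : Bool) (x1 y1 x2 y2 xm ym depth h_ : Int),
    0 ≤ x1 → x1 ≤ 4 → 0 ≤ y1 → y1 ≤ 4 → 0 ≤ x2 → x2 ≤ 4 → 0 ≤ y2 → y2 ≤ 4 →
    0 ≤ xm → xm ≤ 4 → 0 ≤ ym → ym ≤ 4 → depth + (k : Int) = h_ →
    mmA k [x1, y1] [x2, y2] [xm, ym] depth turn h_ =
      (tblB k turn)[encN x1 y1 * 625 + encN x2 y2 * 25 + encN xm ym]!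

@[simp] theorem pyat_zero (a : Int) (t : List Int) : pyat (a :: t) 0 = a := by
  simp [pyat]
@[simp] theorem pyat_one (a b : Int) (t : List Int) : pyat (a :: b :: t) 1 = b := by
  simp [pyat, pysem]

theorem oorA_false (a b : Int) (h0 : 0 ≤ a) (h4 : a ≤ 4) (k0 : 0 ≤ b) (k4 : b ≤ 4) :
    oorA [a, b] = false := by
  simp [oorA]; omega

theorem ofFn_get! (f : Fin 15625 → Int) (s : Nat) (h : s < 15625) :
    (Array.ofFn f)[s]! = f ⟨s, h⟩ := by
  rw [Array.getElem!_eq_getD, Array.getD_eq_getD_getElem?, Array.getElem?_ofFn]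
  simp [h]

theorem enc_lt (x y : Int) (hx0 : 0 ≤ x) (hx4 : x ≤ 4) (hy0 : 0 ≤ y) (hy4 : y ≤ 4) :
    encN x y < 25 := by
  simp [encN]; omega

theorem enc_div5 (x y : Int) (hx0 : 0 ≤ x) (hx4 : x ≤ 4) (hy0 : 0 ≤ y) (hy4 : y ≤ 4) :
    ((encN x y / 5 : Nat) : Int) = x := by
  simp [encN]; omega

theorem enc_mod5 (x y : Int) (hx0 : 0 ≤ x) (hx4 : x ≤ 4) (hy0 : 0 ≤ y) (hy4 : y ≤ 4) :
    ((encN x y % 5 : Nat) : Int) = y := by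
  simp [encN]; omega

theorem enc_inj (x y u v : Int) (hx0 : 0 ≤ x) (hx4 : x ≤ 4) (hy0 : 0 ≤ y) (hy4 : y ≤ 4)
    (hu0 : 0 ≤ u) (hu4 : u ≤ 4) (hv0 : 0 ≤ v) (hv4 : v ≤ 4) :
    encN x y = encN u v ↔ (x = u ∧ y = v) := by
  simp [encN]; omega

theorem idx_div625 (e1 e2 e3 : Nat) (h1 : e1 < 25) (h2 : e2 < 25) (h3 : e3 < 25) :
    (e1 * 625 + e2 * 25 + e3) / 625 = e1 := by omega

theorem idx_mid (e1 e2 e3 : Nat) (h1 : e1 < 25) (h2 : e2 < 25) (h3 : e3 < 25) :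
    (e1 * 625 + e2 * 25 + e3) / 25 % 25 = e2 := by omega

theorem idx_mod (e1 e2 e3 : Nat) (h1 : e1 < 25) (h2 : e2 < 25) (h3 : e3 < 25) :
    (e1 * 625 + e2 * 25 + e3) % 25 = e3 := by omega

theorem distB_enc (x y u v : Int) (hx0 : 0 ≤ x) (hx4 : x ≤ 4) (hy0 : 0 ≤ y) (hy4 : y ≤ 4)
    (hu0 : 0 ≤ u) (hu4 : u ≤ 4) (hv0 : 0 ≤ v) (hv4 : v ≤ 4) :
    distB (encN x y) (encN u v) = |x - u| + |y - v| := by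
  unfold distB
  rw [enc_div5 x y hx0 hx4 hy0 hy4, enc_mod5 x y hx0 hx4 hy0 hy4,
      enc_div5 u v hu0 hu4 hv0 hv4, enc_mod5 u v hu0 hu4 hv0 hv4]

-- lookB over Source B's step(), decoded to coordinates
theorem lookB_stepB (prev : Array Int) (oorVal : Int) (mk : Nat → Nat) (x y dx dy : Int)
    (hx0 : 0 ≤ x) (hx4 : x ≤ 4) (hy0 : 0 ≤ y) (hy4 : y ≤ 4) :
    lookB prev oorVal (stepB (encN x y) dx dy) mk =
      (if 0 ≤ x + dx ∧ x + dx ≤ 4 ∧ 0 ≤ y + dy ∧ y + dy ≤ 4 then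
        prev[mk (encN (x + dx) (y + dy))]! else oorVal) := by
  unfold stepB
  rw [enc_div5 x y hx0 hx4 hy0 hy4, enc_mod5 x y hx0 hx4 hy0 hy4]
  by_cases h : 0 ≤ x + dx ∧ x + dx ≤ 4 ∧ 0 ≤ y + dy ∧ y + dy ≤ 4
  · rw [if_pos h, if_pos h]
    simp [lookB, encN]
  · rw [if_neg h, if_neg h]
    simp [lookB]

-- one-step unfolding of the fuel recursion (literal restatement of mmA's body)
set_option maxHeartbeats 8000000 in
theorem mmA_succ (f : Nat) (a1 a2 mrx : List Int) (depth : Int) (is_mrx : Bool) (h_ : Int) :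
    mmA (f + 1) a1 a2 mrx depth is_mrx h_ =
      (if oorA a1 || oorA a2 || oorA mrx then (if is_mrx then 1000 else -1000)
      else if a1 == mrx || a2 == mrx then -100 * (h_ - depth + 1)
      else if depth == h_ then min (distA a1 mrx) (distA a2 mrx)
      else
        if is_mrx then
          max (max (max
            (mmA f a1 a2 [pyat mrx 0 + 1, pyat mrx 1] (depth + 1) false h_)
            (mmA f a1 a2 [pyat mrx 0 - 1, pyat mrx 1] (depth + 1) false h_))
            (mmA f a1 a2 [pyat mrx 0, pyat mrx 1 + 1] (depth + 1) false h_))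
            (mmA f a1 a2 [pyat mrx 0, pyat mrx 1 - 1] (depth + 1) false h_)
        else
          min (min (min (min (min (min (min
            (mmA f [pyat a1 0 + 1, pyat a1 1] a2 mrx (depth + 1) true h_)
            (mmA f [pyat a1 0 - 1, pyat a1 1] a2 mrx (depth + 1) true h_))
            (mmA f [pyat a1 0, pyat a1 1 + 1] a2 mrx (depth + 1) true h_))
            (mmA f [pyat a1 0, pyat a1 1 - 1] a2 mrx (depth + 1) true h_))
            (mmA f a1 [pyat a2 0 + 1, pyat a2 1] mrx (depth + 1) true h_))
            (mmA f a1 [pyat a2 0 - 1, pyat a2 1] mrx (depth + 1) true h_))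
            (mmA f a1 [pyat a2 0, pyat a2 1 + 1] mrx (depth + 1) true h_))
            (mmA f a1 [pyat a2 0, pyat a2 1 - 1] mrx (depth + 1) true h_)) := rfl

theorem tblB_get_zero (turn : Bool) (s : Nat) (h : s < 15625) :
    (tblB 0 turn)[s]! = baseB s := by
  rw [show tblB 0 turn = Array.ofFn (fun s : Fin 15625 => baseB ↑s) from rfl, ofFn_get! _ _ h]

theorem tblB_get_succ (k : Nat) (turn : Bool) (s : Nat) (h : s < 15625) :
    (tblB (k + 1) turn)[s]! = entryB (k + 1) turn (tblB k (!turn)) s := by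
  rw [show tblB (k + 1) turn =
        Array.ofFn (fun s : Fin 15625 => entryB (k + 1) turn (tblB k (!turn)) ↑s) from rfl,
      ofFn_get! _ _ h]

-- zero-fuel unfolding (literal restatement of mmA's body at fuel 0)
theorem mmA_zero (a1 a2 mrx : List Int) (depth : Int) (is_mrx : Bool) (h_ : Int) :
    mmA 0 a1 a2 mrx depth is_mrx h_ =
      (if oorA a1 || oorA a2 || oorA mrx then (if is_mrx then 1000 else -1000)
      else if a1 == mrx || a2 == mrx then -100 * (h_ - depth + 1)
      else if depth == h_ then min (distA a1 mrx) (distA a2 mrx)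
      else 0) := rfl

-- A returns its out-of-range sentinel whatever the fuel
theorem mmA_oor (fuel : Nat) (a1 a2 mrx : List Int) (depth : Int) (is_mrx : Bool) (h_ : Int)
    (hoor : (oorA a1 || oorA a2 || oorA mrx) = true) :
    mmA fuel a1 a2 mrx depth is_mrx h_ = (if is_mrx then 1000 else -1000) := by
  cases fuel with
  | zero => rw [mmA_zero, hoor]; rfl
  | succ f => rw [mmA_succ, hoor]; rfl

theorem oorA_true_of (x : List Int) (h : OorTrue x) : oorA x = true := by
  rcases h with ⟨hlen, hout⟩ | ⟨hlen, h0a, h0b, hout⟩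
  · obtain ⟨a, t, rfl⟩ : ∃ a t, x = a :: t := by
      cases x with
      | nil => simp at hlen
      | cons a t => exact ⟨a, t, rfl⟩
    simp only [List.getD_cons_zero] at hout
    simp [oorA]; omega
  · obtain ⟨a, b, t, rfl⟩ : ∃ a b t, x = a :: b :: t := by
      cases x with
      | nil => simp at hlen
      | cons a t =>
        cases t with
        | nil => simp at hlen
        | cons b t => exact ⟨a, b, t, rfl⟩
    simp only [List.getD_cons_zero, List.getD_cons_succ] at hout
    simp [oorA]; omega

-- A returns the leaf distance whatever the fuel
theorem mmA_leaf (fuel : Nat) (a1 a2 mrx : List Int) (depth : Int) (is_mrx : Bool) (h_ : Int)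
    (hoorf : (oorA a1 || oorA a2 || oorA mrx) = false)
    (hbeqf : (a1 == mrx || a2 == mrx) = false) (hdep : depth = h_) :
    mmA fuel a1 a2 mrx depth is_mrx h_ = min (distA a1 mrx) (distA a2 mrx) := by
  cases fuel with
  | zero =>
    rw [mmA_zero, hoorf, if_neg (show ¬(false = true) from by simp), hbeqf,
      if_neg (show ¬(false = true) from by simp), if_pos (by rw [hdep]; exact beq_self_eq_true h_)]
  | succ f =>
    rw [mmA_succ, hoorf, if_neg (show ¬(false = true) from by simp), hbeqf,
      if_neg (show ¬(false = true) from by simp), if_pos (by rw [hdep]; exact beq_self_eq_true h_)]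

-- A returns the capture penalty whatever the fuel
theorem mmA_caught (fuel : Nat) (a1 a2 mrx : List Int) (depth : Int) (is_mrx : Bool) (h_ : Int)
    (hoorf : (oorA a1 || oorA a2 || oorA mrx) = false)
    (hbeq : (a1 == mrx || a2 == mrx) = true) :
    mmA fuel a1 a2 mrx depth is_mrx h_ = -100 * (h_ - depth + 1) := by
  cases fuel with
  | zero => rw [mmA_zero, hoorf, if_neg (by simp), if_pos hbeq]
  | succ f => rw [mmA_succ, hoorf, if_neg (by simp), if_pos hbeq]

-- a child where mrx has moved (parent turn = true, child turn = false)
theorem child_m (k : Nat) (ih : LProp k) (x1 y1 x2 y2 nx ny depth h_ : Int)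
    (h1 : 0 ≤ x1) (h2 : x1 ≤ 4) (h3 : 0 ≤ y1) (h4 : y1 ≤ 4)
    (h5 : 0 ≤ x2) (h6 : x2 ≤ 4) (h7 : 0 ≤ y2) (h8 : y2 ≤ 4)
    (hd : depth + (k : Int) = h_) :
    mmA k [x1, y1] [x2, y2] [nx, ny] depth false h_ =
      (if 0 ≤ nx ∧ nx ≤ 4 ∧ 0 ≤ ny ∧ ny ≤ 4 then
        (tblB k false)[encN x1 y1 * 625 + encN x2 y2 * 25 + encN nx ny]! else -1000) := by
  by_cases h : 0 ≤ nx ∧ nx ≤ 4 ∧ 0 ≤ ny ∧ ny ≤ 4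
  · rw [if_pos h]
    exact ih false x1 y1 x2 y2 nx ny depth h_ h1 h2 h3 h4 h5 h6 h7 h8 h.1 h.2.1 h.2.2.1 h.2.2.2 hd
  · rw [if_neg h]
    have hoor : (oorA [x1, y1] || oorA [x2, y2] || oorA [nx, ny]) = true := by
      have : oorA [nx, ny] = true := by simp [oorA]; omega
      simp [this]
    rw [mmA_oor _ _ _ _ _ _ _ hoor]
    rfl

-- a child where agent 1 has moved (parent turn = false, child turn = true)
theorem child_c1 (k : Nat) (ih : LProp k) (nx ny x2 y2 xm ym depth h_ : Int)
    (h5 : 0 ≤ x2) (h6 : x2 ≤ 4) (h7 : 0 ≤ y2) (h8 : y2 ≤ 4)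
    (h9 : 0 ≤ xm) (h10 : xm ≤ 4) (h11 : 0 ≤ ym) (h12 : ym ≤ 4)
    (hd : depth + (k : Int) = h_) :
    mmA k [nx, ny] [x2, y2] [xm, ym] depth true h_ =
      (if 0 ≤ nx ∧ nx ≤ 4 ∧ 0 ≤ ny ∧ ny ≤ 4 then
        (tblB k true)[encN nx ny * 625 + encN x2 y2 * 25 + encN xm ym]! else 1000) := by
  by_cases h : 0 ≤ nx ∧ nx ≤ 4 ∧ 0 ≤ ny ∧ ny ≤ 4
  · rw [if_pos h]
    exact ih true nx ny x2 y2 xm ym depth h_ h.1 h.2.1 h.2.2.1 h.2.2.2 h5 h6 h7 h8 h9 h10 h11 h12 hd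
  · rw [if_neg h]
    have hoor : (oorA [nx, ny] || oorA [x2, y2] || oorA [xm, ym]) = true := by
      have : oorA [nx, ny] = true := by simp [oorA]; omega
      simp [this]
    rw [mmA_oor _ _ _ _ _ _ _ hoor]
    rfl

-- a child where agent 2 has moved (parent turn = false, child turn = true)
theorem child_c2 (k : Nat) (ih : LProp k) (x1 y1 nx ny xm ym depth h_ : Int)
    (h1 : 0 ≤ x1) (h2 : x1 ≤ 4) (h3 : 0 ≤ y1) (h4 : y1 ≤ 4)
    (h9 : 0 ≤ xm) (h10 : xm ≤ 4) (h11 : 0 ≤ ym) (h12 : ym ≤ 4)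
    (hd : depth + (k : Int) = h_) :
    mmA k [x1, y1] [nx, ny] [xm, ym] depth true h_ =
      (if 0 ≤ nx ∧ nx ≤ 4 ∧ 0 ≤ ny ∧ ny ≤ 4 then
        (tblB k true)[encN x1 y1 * 625 + encN nx ny * 25 + encN xm ym]! else 1000) := by
  by_cases h : 0 ≤ nx ∧ nx ≤ 4 ∧ 0 ≤ ny ∧ ny ≤ 4
  · rw [if_pos h]
    exact ih true x1 y1 nx ny xm ym depth h_ h1 h2 h3 h4 h.1 h.2.1 h.2.2.1 h.2.2.2 h9 h10 h11 h12 hd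
  · rw [if_neg h]
    have hoor : (oorA [x1, y1] || oorA [nx, ny] || oorA [xm, ym]) = true := by
      have : oorA [nx, ny] = true := by simp [oorA]; omega
      simp [this]
    rw [mmA_oor _ _ _ _ _ _ _ hoor]
    rfl

theorem L_all (k : Nat) : LProp k := by
  induction k with
  | zero =>
    intro turn x1 y1 x2 y2 xm ym depth h_ h1 h2 h3 h4 h5 h6 h7 h8 h9 h10 h11 h12 hd
    have e1 := enc_lt x1 y1 h1 h2 h3 h4
    have e2 := enc_lt x2 y2 h5 h6 h7 h8
    have e3 := enc_lt xm ym h9 h10 h11 h12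
    have hidx : encN x1 y1 * 625 + encN x2 y2 * 25 + encN xm ym < 15625 := by omega
    have d1 := idx_div625 _ _ _ e1 e2 e3
    have d2 := idx_mid _ _ _ e1 e2 e3
    have d3 := idx_mod _ _ _ e1 e2 e3
    have hdep : depth = h_ := by push_cast at hd; omega
    rw [tblB_get_zero _ _ hidx, mmA_zero]
    rw [show (oorA [x1, y1] || oorA [x2, y2] || oorA [xm, ym]) = false from by
      rw [oorA_false _ _ h1 h2 h3 h4, oorA_false _ _ h5 h6 h7 h8, oorA_false _ _ h9 h10 h11 h12]; rfl]
    rw [if_neg (by simp)]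
    by_cases hc : (x1 = xm ∧ y1 = ym) ∨ (x2 = xm ∧ y2 = ym)
    · rw [if_pos (by
        simp only [Bool.or_eq_true, beq_iff_eq, List.cons.injEq, and_true]
        tauto)]
      have hcaught : caughtB (encN x1 y1 * 625 + encN x2 y2 * 25 + encN xm ym) = true := by
        simp only [caughtB, d1, d2, d3, Bool.or_eq_true, beq_iff_eq]
        rcases hc with ⟨ha, hb⟩ | ⟨ha, hb⟩
        · exact Or.inl (by rw [ha, hb])
        · exact Or.inr (by rw [ha, hb])
      unfold baseB
      rw [hcaught, if_pos rfl]
      omega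
    · rw [if_neg (by
        simp only [Bool.or_eq_true, beq_iff_eq, List.cons.injEq, and_true]
        tauto)]
      rw [if_pos (by rw [hdep]; exact beq_self_eq_true h_)]
      have hcaught : caughtB (encN x1 y1 * 625 + encN x2 y2 * 25 + encN xm ym) = false := by
        simp only [caughtB, d1, d2, d3, Bool.or_eq_false_iff, ne_eq, beq_eq_false_iff_ne,
          enc_inj x1 y1 xm ym h1 h2 h3 h4 h9 h10 h11 h12,
          enc_inj x2 y2 xm ym h5 h6 h7 h8 h9 h10 h11 h12]
        tauto
      unfold baseB
      rw [hcaught, if_neg (by simp)]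
      rw [d1, d2, d3,
        distB_enc x1 y1 xm ym h1 h2 h3 h4 h9 h10 h11 h12,
        distB_enc x2 y2 xm ym h5 h6 h7 h8 h9 h10 h11 h12]
      simp [distA]
  | succ k ih =>
    intro turn x1 y1 x2 y2 xm ym depth h_ h1 h2 h3 h4 h5 h6 h7 h8 h9 h10 h11 h12 hd
    have e1 := enc_lt x1 y1 h1 h2 h3 h4
    have e2 := enc_lt x2 y2 h5 h6 h7 h8
    have e3 := enc_lt xm ym h9 h10 h11 h12
    have hidx : encN x1 y1 * 625 + encN x2 y2 * 25 + encN xm ym < 15625 := by omega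
    have d1 := idx_div625 _ _ _ e1 e2 e3
    have d2 := idx_mid _ _ _ e1 e2 e3
    have d3 := idx_mod _ _ _ e1 e2 e3
    have hd' : (depth + 1) + (k : Int) = h_ := by push_cast at hd ⊢; omega
    have hdne : depth ≠ h_ := by push_cast at hd; omega
    rw [tblB_get_succ _ _ _ hidx, mmA_succ]
    rw [show (oorA [x1, y1] || oorA [x2, y2] || oorA [xm, ym]) = false from by
      rw [oorA_false _ _ h1 h2 h3 h4, oorA_false _ _ h5 h6 h7 h8, oorA_false _ _ h9 h10 h11 h12]; rfl]
    rw [if_neg (by simp)]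
    by_cases hc : (x1 = xm ∧ y1 = ym) ∨ (x2 = xm ∧ y2 = ym)
    · rw [if_pos (by
        simp only [Bool.or_eq_true, beq_iff_eq, List.cons.injEq, and_true]
        tauto)]
      have hcaught : caughtB (encN x1 y1 * 625 + encN x2 y2 * 25 + encN xm ym) = true := by
        simp only [caughtB, d1, d2, d3, Bool.or_eq_true, beq_iff_eq]
        rcases hc with ⟨ha, hb⟩ | ⟨ha, hb⟩
        · exact Or.inl (by rw [ha, hb])
        · exact Or.inr (by rw [ha, hb])
      unfold entryB
      rw [hcaught, if_pos rfl]
      push_cast at hd ⊢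
      omega
    · rw [if_neg (by
        simp only [Bool.or_eq_true, beq_iff_eq, List.cons.injEq, and_true]
        tauto)]
      rw [if_neg (show ¬((depth == h_) = true) from by simpa using hdne)]
      have hcaught : caughtB (encN x1 y1 * 625 + encN x2 y2 * 25 + encN xm ym) = false := by
        simp only [caughtB, d1, d2, d3, Bool.or_eq_false_iff, ne_eq, beq_eq_false_iff_ne,
          enc_inj x1 y1 xm ym h1 h2 h3 h4 h9 h10 h11 h12,
          enc_inj x2 y2 xm ym h5 h6 h7 h8 h9 h10 h11 h12]
        tauto
      simp only [entryB, pyat_zero, pyat_one, d1, d2, d3]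
      rw [hcaught, if_neg (show ¬(false = true) from by simp)]
      cases turn with
      | true =>
        simp only [if_pos (show true = true from rfl)]
        rw [child_m k ih x1 y1 x2 y2 (xm + 1) ym (depth + 1) h_ h1 h2 h3 h4 h5 h6 h7 h8 hd',
            child_m k ih x1 y1 x2 y2 (xm - 1) ym (depth + 1) h_ h1 h2 h3 h4 h5 h6 h7 h8 hd',
            child_m k ih x1 y1 x2 y2 xm (ym + 1) (depth + 1) h_ h1 h2 h3 h4 h5 h6 h7 h8 hd',
            child_m k ih x1 y1 x2 y2 xm (ym - 1) (depth + 1) h_ h1 h2 h3 h4 h5 h6 h7 h8 hd']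
        rw [lookB_stepB _ _ _ xm ym 1 0 h9 h10 h11 h12,
            lookB_stepB _ _ _ xm ym (-1) 0 h9 h10 h11 h12,
            lookB_stepB _ _ _ xm ym 0 1 h9 h10 h11 h12,
            lookB_stepB _ _ _ xm ym 0 (-1) h9 h10 h11 h12]
        simp only [add_zero, if_true, Bool.not_true, ← sub_eq_add_neg]
      | false =>
        simp only [if_neg (show ¬(false = true) from by simp)]
        rw [child_c1 k ih (x1 + 1) y1 x2 y2 xm ym (depth + 1) h_ h5 h6 h7 h8 h9 h10 h11 h12 hd',
            child_c1 k ih (x1 - 1) y1 x2 y2 xm ym (depth + 1) h_ h5 h6 h7 h8 h9 h10 h11 h12 hd',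
            child_c1 k ih x1 (y1 + 1) x2 y2 xm ym (depth + 1) h_ h5 h6 h7 h8 h9 h10 h11 h12 hd',
            child_c1 k ih x1 (y1 - 1) x2 y2 xm ym (depth + 1) h_ h5 h6 h7 h8 h9 h10 h11 h12 hd',
            child_c2 k ih x1 y1 (x2 + 1) y2 xm ym (depth + 1) h_ h1 h2 h3 h4 h9 h10 h11 h12 hd',
            child_c2 k ih x1 y1 (x2 - 1) y2 xm ym (depth + 1) h_ h1 h2 h3 h4 h9 h10 h11 h12 hd',
            child_c2 k ih x1 y1 x2 (y2 + 1) xm ym (depth + 1) h_ h1 h2 h3 h4 h9 h10 h11 h12 hd',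
            child_c2 k ih x1 y1 x2 (y2 - 1) xm ym (depth + 1) h_ h1 h2 h3 h4 h9 h10 h11 h12 hd']
        rw [lookB_stepB _ _ _ x1 y1 1 0 h1 h2 h3 h4,
            lookB_stepB _ _ _ x1 y1 (-1) 0 h1 h2 h3 h4,
            lookB_stepB _ _ _ x1 y1 0 1 h1 h2 h3 h4,
            lookB_stepB _ _ _ x1 y1 0 (-1) h1 h2 h3 h4,
            lookB_stepB _ _ _ x2 y2 1 0 h5 h6 h7 h8,
            lookB_stepB _ _ _ x2 y2 (-1) 0 h5 h6 h7 h8,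
            lookB_stepB _ _ _ x2 y2 0 1 h5 h6 h7 h8,
            lookB_stepB _ _ _ x2 y2 0 (-1) h5 h6 h7 h8]
        simp only [add_zero, if_true, Bool.not_true, Bool.not_false, ← sub_eq_add_neg]

-- ===== VERDICT (by name: the statement is the Claim_ definition above) =====
theorem minimax_step_spec : Claim_equal_minimax_step := by
  intro a1 a2 mrx depth is_mrx h_ hdom hpre
  unfold Spec_minimax_step minimax_step minimax_step_alt
  have hbig : (decide (pyat a1 0 < 0) || decide (pyat a1 0 > 4) || decide (pyat a1 1 < 0) || decide (pyat a1 1 > 4)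
      || decide (pyat a2 0 < 0) || decide (pyat a2 0 > 4) || decide (pyat a2 1 < 0) || decide (pyat a2 1 > 4)
      || decide (pyat mrx 0 < 0) || decide (pyat mrx 0 > 4) || decide (pyat mrx 1 < 0) || decide (pyat mrx 1 > 4))
      = (oorA a1 || oorA a2 || oorA mrx) := by
    simp only [oorA, Bool.or_assoc]
  rw [hbig]
  by_cases hoor : (oorA a1 || oorA a2 || oorA mrx) = true
  · rw [mmA_oor _ _ _ _ _ _ _ hoor, if_pos hoor]
  · have hoorf : (oorA a1 || oorA a2 || oorA mrx) = false := Bool.not_eq_true _ |>.mp hoor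
    rw [hoorf, if_neg (show ¬(false = true) from by simp)]
    by_cases hc : (a1 == mrx || a2 == mrx) = true
    · rw [mmA_caught _ _ _ _ _ _ _ hoorf hc, if_pos hc]
    · have hcf : (a1 == mrx || a2 == mrx) = false := Bool.not_eq_true _ |>.mp hc
      rw [hcf, if_neg (show ¬(false = true) from by simp)]
      rcases hpre with hg1 | ⟨hF1, hF2, hF3, hrest⟩
      · exfalso
        refine hoor ?_
        rcases hg1 with h | ⟨hf, h⟩ | ⟨hf1, hf2, h⟩ <;> simp [oorA_true_of _ h]
      · rcases hrest with heq | heq | ⟨hdep, hne1, hne2⟩ | ⟨hl1, hl2, hl3, hle⟩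
        · exfalso; simp [heq] at hcf
        · exfalso; simp [heq] at hcf
        · -- leaf evaluation at depth = h with lists of any length ≥ 2
          obtain ⟨x1, y1, t1, rfl⟩ : ∃ u v t, a1 = u :: v :: t := by
            obtain ⟨hlen, -⟩ := hF1
            cases a1 with
            | nil => simp at hlen
            | cons a t => cases t with
              | nil => simp at hlen
              | cons b t => exact ⟨a, b, t, rfl⟩
          obtain ⟨x2, y2, t2, rfl⟩ : ∃ u v t, a2 = u :: v :: t := by
            obtain ⟨hlen, -⟩ := hF2
            cases a2 with
            | nil => simp at hlen
            | cons a t => cases t with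
              | nil => simp at hlen
              | cons b t => exact ⟨a, b, t, rfl⟩
          obtain ⟨xm, ym, tm, rfl⟩ : ∃ u v t, mrx = u :: v :: t := by
            obtain ⟨hlen, -⟩ := hF3
            cases mrx with
            | nil => simp at hlen
            | cons a t => cases t with
              | nil => simp at hlen
              | cons b t => exact ⟨a, b, t, rfl⟩
          simp only [List.getD_cons_zero, List.getD_cons_succ] at hne1 hne2
          obtain ⟨-, h1, h2, h3, h4⟩ := hF1
          obtain ⟨-, h5, h6, h7, h8⟩ := hF2
          obtain ⟨-, h9, h10, h11, h12⟩ := hF3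
          have e1 := enc_lt x1 y1 h1 h2 h3 h4
          have e2 := enc_lt x2 y2 h5 h6 h7 h8
          have e3 := enc_lt xm ym h9 h10 h11 h12
          have hidx : encN x1 y1 * 625 + encN x2 y2 * 25 + encN xm ym < 15625 := by omega
          simp only [pyat_zero, pyat_one]
          rw [mmA_leaf _ _ _ _ _ _ _ hoorf hcf hdep,
            show (h_ - depth).toNat = 0 from by omega, tblB_get_zero _ _ hidx]
          have hcaught : caughtB (encN x1 y1 * 625 + encN x2 y2 * 25 + encN xm ym) = false := by
            simp only [caughtB, idx_div625 _ _ _ e1 e2 e3, idx_mid _ _ _ e1 e2 e3,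
              idx_mod _ _ _ e1 e2 e3, Bool.or_eq_false_iff, ne_eq, beq_eq_false_iff_ne,
              enc_inj x1 y1 xm ym h1 h2 h3 h4 h9 h10 h11 h12,
              enc_inj x2 y2 xm ym h5 h6 h7 h8 h9 h10 h11 h12]
            tauto
          unfold baseB
          rw [hcaught, if_neg (show ¬(false = true) from by simp)]
          rw [idx_div625 _ _ _ e1 e2 e3, idx_mid _ _ _ e1 e2 e3, idx_mod _ _ _ e1 e2 e3,
            distB_enc x1 y1 xm ym h1 h2 h3 h4 h9 h10 h11 h12,
            distB_enc x2 y2 xm ym h5 h6 h7 h8 h9 h10 h11 h12]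
          simp [distA]
        · -- the genuine game: 2-element positions, depth ≤ h — the DP invariant L_all
          obtain ⟨x1, y1, rfl⟩ := List.length_eq_two.mp hl1
          obtain ⟨x2, y2, rfl⟩ := List.length_eq_two.mp hl2
          obtain ⟨xm, ym, rfl⟩ := List.length_eq_two.mp hl3
          obtain ⟨-, h1, h2, h3, h4⟩ := hF1
          obtain ⟨-, h5, h6, h7, h8⟩ := hF2
          obtain ⟨-, h9, h10, h11, h12⟩ := hF3
          have hk : depth + (((h_ - depth).toNat : Nat) : Int) = h_ := by omega
          rw [L_all ((h_ - depth).toNat) is_mrx x1 y1 x2 y2 xm ym depth h_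
            h1 h2 h3 h4 h5 h6 h7 h8 h9 h10 h11 h12 hk]
          simp only [pyat_zero, pyat_one]
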